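-- pv_equiv track=rewrite | github.com/duriantaco/aegisRT | aegisrt/converters/evasion.py | convert
-- ===== SOURCE A (Python) =====
-- ZERO_WIDTH_SPACE = "\u200b"
--
-- ZERO_WIDTH_JOINER = "\u200d"
--
-- ZERO_WIDTH_NON_JOINER = "\u200c"
--
-- def convert(text: str) -> str:
--     zwc = [ZERO_WIDTH_SPACE, ZERO_WIDTH_JOINER, ZERO_WIDTH_NON_JOINER]
--     result: list[str] = []
--     for idx, ch in enumerate(text):
--         result.append(ch)
--         if idx < len(text) - 1:
--             result.append(zwc[idx % len(zwc)])
--     return "".join(result)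
-- ===== SOURCE B (Python) =====
-- ZERO_WIDTH_SPACE = "\u200b"
-- ZERO_WIDTH_JOINER = "\u200d"
-- ZERO_WIDTH_NON_JOINER = "\u200c"
--
-- def convert(text: str) -> str:
--     if not text:
--         return ""
--     # The separator cycle realigns at every triple, so the pattern
--     # ZWS, ZWJ, ZWNJ can be hard-coded per chunk of three characters:
--     # consume full triples while more than three characters remain,
--     # then finish the 1..3-character tail with the pattern prefix.
--     out = []
--     i = 0
--     while len(text) - i > 3:
--         out.append(text[i] + ZERO_WIDTH_SPACE + text[i + 1]
--                    + ZERO_WIDTH_JOINER + text[i + 2] + ZERO_WIDTH_NON_JOINER)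
--         i += 3
--     rem = text[i:]
--     if len(rem) == 1:
--         out.append(rem)
--     elif len(rem) == 2:
--         out.append(rem[0] + ZERO_WIDTH_SPACE + rem[1])
--     else:
--         out.append(rem[0] + ZERO_WIDTH_SPACE + rem[1] + ZERO_WIDTH_JOINER + rem[2])
--     return "".join(out)
-- ===== Notes on version B (the rewrite author's own statement) =====
-- stated objective: alternative
-- what changed: Replaces A's per-character indexed loop with its bounds check and mod-3 separator lookup by a triple-chunk pass: consume three characters per iteration with the three-separator pattern hard-coded, then a 1..3-character tail case (no modular arithmetic, no per-character boundary test).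
import Mathlib
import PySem

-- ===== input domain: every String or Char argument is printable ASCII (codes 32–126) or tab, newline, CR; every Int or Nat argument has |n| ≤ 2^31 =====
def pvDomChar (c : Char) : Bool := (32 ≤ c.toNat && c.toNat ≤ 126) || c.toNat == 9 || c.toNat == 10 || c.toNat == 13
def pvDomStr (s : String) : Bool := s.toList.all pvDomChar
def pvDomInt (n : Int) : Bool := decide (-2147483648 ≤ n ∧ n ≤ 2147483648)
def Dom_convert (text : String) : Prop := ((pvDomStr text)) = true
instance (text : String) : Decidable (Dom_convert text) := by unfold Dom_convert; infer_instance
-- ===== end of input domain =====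

-- B interleaves the same zero-width separators by a different decomposition: a triple-chunk pass
-- (three characters consumed per step, separator pattern hard-coded, 1..3-char tail); same value, same O(n).

-- the three zero-width characters, as in the Python module constants
def zwcL : List Char := ['\u200B', '\u200D', '\u200C']

-- ===== PORT A =====
-- loop body of A: append ch; if idx < len(text) - 1, also append zwc[idx % 3]
def stepA (n : Nat) (acc : List Char) (p : Int × Char) : List Char :=
  let acc := acc ++ [p.2]
  if p.1 < (n : Int) - 1 then acc ++ [PySem.List.pyGetD zwcL (PySem.Int.mod p.1 3) ' ']
  else acc

-- literal port of A: fold the loop body over enumerate(text), then join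
def convert (text : String) : String :=
  let cs := text.toList
  String.ofList ((PySem.List.enumerate cs).foldl (stepA cs.length) [])

-- ===== PORT B =====
-- port of B's while loop: one step per full triple (pattern hard-coded), the last three
-- equations are the 1..3-character tail branch; consuming the list tracks B's index i
def goB : List Char → List Char
  | [] => []
  | [a] => [a]
  | [a, b] => [a, '\u200B', b]
  | [a, b, c] => [a, '\u200B', b, '\u200D', c]
  | a :: b :: c :: rest => [a, '\u200B', b, '\u200D', c, '\u200C'] ++ goB rest

-- literal port of B: empty text returns "", otherwise the chunk pass
def convert_alt (text : String) : String :=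
  if text.toList.isEmpty then "" else String.ofList (goB text.toList)

-- ===== PRECONDITION & SPEC =====
def Spec_convert (text : String) (out : String) : Prop := out = convert_alt text
instance (text : String) (out : String) : Decidable (Spec_convert text out) := by unfold Spec_convert; infer_instance

-- ===== CLAIM (what is proved, stated in full; the proofs are below) =====
def Claim_equal_convert : Prop := ∀ (text : String), Dom_convert text → Spec_convert text (convert text)

-- ===== LEMMAS AND PROOFS =====

-- separator for gap k
def sepc (k : Nat) : Char := zwcL.getD (k % 3) ' '

-- characterization of A's loop: interleaving with running index k out of total length n
def inter (n : Nat) : Nat → List Char → List Char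
  | _, [] => []
  | k, c :: rest =>
      if (k : Int) < (n : Int) - 1 then c :: sepc k :: inter n (k + 1) rest
      else c :: inter n (k + 1) rest

theorem foldA_eq_inter (n : Nat) (l : List Char) : ∀ (s : Nat) (acc : List Char),
    (PySem.List.enumerate l (s : Int)).foldl (stepA n) acc = acc ++ inter n s l := by
  induction l with
  | nil => intro s acc; simp [PySem.List.enumerate_nil, inter]
  | cons c rest ih =>
    intro s acc
    rw [PySem.List.enumerate_cons, List.foldl_cons]
    have hcast : ((s : Int) + 1) = (((s + 1 : Nat)) : Int) := by push_cast; ring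
    have hsep : PySem.List.pyGetD zwcL ((s : Int) % 3) ' ' = sepc s := by
      have h3 : ((s : Int) % 3) = (((s % 3 : Nat)) : Int) := by push_cast; ring
      rw [h3, PySem.List.pyGetD_natCast]; rfl
    by_cases h : (s : Int) < (n : Int) - 1
    · rw [show stepA n acc ((s : Int), c) = acc ++ [c, sepc s] from by
          simp [stepA, h, hsep],
        hcast, ih (s + 1), inter, if_pos h]
      simp
    · rw [show stepA n acc ((s : Int), c) = acc ++ [c] from by
          simp [stepA, h],
        hcast, ih (s + 1), inter, if_neg h]
      simp

theorem foldA_eq_inter0 (n : Nat) (l : List Char) :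
    (PySem.List.enumerate l).foldl (stepA n) [] = inter n 0 l := by
  have h := foldA_eq_inter n l 0 []
  simpa using h

-- B's recursion on triples equals A's interleaving whenever the running index is a multiple of 3
theorem inter_eq_goB (n : Nat) : ∀ (l : List Char) (k : Nat), k % 3 = 0 → k + l.length = n →
    inter n k l = goB l := by
  intro l
  induction l using goB.induct with
  | case1 => intro k _ _; simp [inter, goB]
  | case2 a =>
    intro k _ hn
    have h : ¬ ((k : Int) < (n : Int) - 1) := by simp at hn; omega
    simp [inter, goB, h]
  | case3 a b =>
    intro k hk hn
    have h1 : (k : Int) < (n : Int) - 1 := by simp at hn; omega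
    have h2 : ¬ ((k : Int) + 1 < (n : Int) - 1) := by simp at hn; omega
    have hs : sepc k = '\u200B' := by
      unfold sepc; rw [hk]; rfl
    simp [inter, goB, h1, h2, hs]
  | case4 a b c =>
    intro k hk hn
    have h1 : (k : Int) < (n : Int) - 1 := by simp at hn; omega
    have h2 : ((k : Int) + 1 < (n : Int) - 1) := by simp at hn; omega
    have h3 : ¬ ((k : Int) + 1 + 1 < (n : Int) - 1) := by simp at hn; omega
    have hs1 : sepc k = '\u200B' := by unfold sepc; rw [hk]; rfl
    have hs2 : sepc (k + 1) = '\u200D' := by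
      unfold sepc; rw [show (k + 1) % 3 = 1 by omega]; rfl
    simp [inter, goB, h1, h2, h3, hs1, hs2]
  | case5 a b c d rest ih =>
    intro k hk hn
    have h1 : (k : Int) < (n : Int) - 1 := by simp at hn; omega
    have h2 : ((k : Int) + 1 < (n : Int) - 1) := by simp at hn; omega
    have hd : 1 ≤ d.length := List.length_pos_of_ne_nil (fun h => rest h)
    have h3 : ((k : Int) + 1 + 1 < (n : Int) - 1) := by simp at hn; omega
    have hs1 : sepc k = '\u200B' := by unfold sepc; rw [hk]; rfl
    have hs2 : sepc (k + 1) = '\u200D' := by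
      unfold sepc; rw [show (k + 1) % 3 = 1 by omega]; rfl
    have hs3 : sepc (k + 1 + 1) = '\u200C' := by
      unfold sepc; rw [show (k + 1 + 1) % 3 = 2 by omega]; rfl
    have hkk : (k + 1 + 1 + 1) % 3 = 0 := by
      have : k + 1 + 1 + 1 = k + 3 := by omega
      rw [this, Nat.add_mod, hk]
    have hrec := ih (k + 1 + 1 + 1) hkk (by simp at hn ⊢; omega)
    simp [inter, goB, h1, h2, h3, hs1, hs2, hs3, hrec]

-- ===== VERDICT (by name: the statement is the Claim_ definition above) =====
theorem convert_spec : Claim_equal_convert := by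
  intro text _
  show convert text = convert_alt text
  unfold convert convert_alt
  dsimp only
  cases hcs : text.toList with
  | nil => rfl
  | cons c rest =>
    rw [foldA_eq_inter0]
    rw [inter_eq_goB (c :: rest).length (c :: rest) 0 rfl (by simp)]
    rfl
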